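-- pv_equiv track=rewrite | github.com/sjogleka/General_codes | longest_sub_grid.py | matrxi
-- ===== SOURCE A (Python) =====
-- def matrxi(a, maxSum):
--     n = len(a)
--     for i in range(n, 0, -1):
--         flag = 0
--         for j in range(0, n - i + 1):
--             if (j == 0 or flag == 1):
--                 flagk = 0
--                 for k in range(0, n - i + 1):
--                     if (k == 0 or flagk == 1):
--                         sum = 0
--                         for l in range(j, j + i):
--                             for m in range(k, k + i):
--                                 sum += a[l][m]
--                         if (sum <= maxSum):
--                             flagk = 1
--                             flag = 1
--                         else:
--                             flag = 0
--                             flagk = 0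
--             else:
--                 break
--         if j == n - i and flag == 1:
--             return i
--
--     return 0
-- ===== SOURCE B (Python) =====
-- def matrxi(a, maxSum):
--     n = len(a)
--     # 2D prefix-sum table: prefix[r][c] = sum of a[0:r][0:c]
--     prefix = [[0] * (n + 1)]
--     for row in a:
--         prev = prefix[-1]
--         cur = [0]
--         acc = 0
--         for c in range(n):
--             acc += row[c]
--             cur.append(prev[c + 1] + acc)
--         prefix.append(cur)
--     for size in range(n, 0, -1):
--         ok = True
--         for r in range(n - size + 1):
--             for c in range(n - size + 1):
--                 if prefix[r + size][c + size] - prefix[r][c + size] - prefix[r + size][c] + prefix[r][c] > maxSum: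
--                     ok = False
--         if ok:
--             return size
--     return 0
-- ===== Notes on version B (the rewrite author's own statement) =====
-- stated objective: alternative
-- what changed: B computes each square sum in O(1) from a precomputed 2D prefix-sum table instead of A's nested per-square re-summation driven by flag/break scanning; it trades A's adaptive early exits for the precomputed table, so it is not measurably faster on random inputs.
import Mathlib
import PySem

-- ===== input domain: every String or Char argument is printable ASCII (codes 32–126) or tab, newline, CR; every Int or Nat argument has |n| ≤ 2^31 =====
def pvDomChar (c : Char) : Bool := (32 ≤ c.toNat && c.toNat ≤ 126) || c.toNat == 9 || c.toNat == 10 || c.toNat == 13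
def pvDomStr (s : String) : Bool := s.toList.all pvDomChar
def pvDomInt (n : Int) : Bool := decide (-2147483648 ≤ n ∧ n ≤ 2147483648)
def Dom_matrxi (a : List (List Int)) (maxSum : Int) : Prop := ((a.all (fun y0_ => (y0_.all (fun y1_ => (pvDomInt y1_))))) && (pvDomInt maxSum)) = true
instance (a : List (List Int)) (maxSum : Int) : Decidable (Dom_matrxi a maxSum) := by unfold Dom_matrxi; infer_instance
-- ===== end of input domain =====

-- Alternative algorithm: B reads each square sum off a precomputed 2D prefix-sum table
-- instead of A's nested per-square re-summation with flag/break scanning.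

-- ===== PORT A =====
-- sum over the i×i block with top-left (j,k):  'for l in range(j, j+i): for m in range(k, k+i): sum += a[l][m]'
def pvSqSumA (a : List (List Int)) (j k i : Int) : Int :=
  (PySem.List.pyRange j (j + i) 1).foldl (fun s l =>
    (PySem.List.pyRange k (k + i) 1).foldl (fun s m =>
      s + PySem.List.pyGetD (PySem.List.pyGetD a l []) m 0) s) 0

-- the 'for k in range(0, n-i+1)' loop carrying (flag, flagk); returns the final flag
def pvKLoop (a : List (List Int)) (maxSum j i : Int) : List Int → Int → Int → Int
  | [], flag, _ => flag
  | k :: rest, flag, flagk =>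
    if k = 0 ∨ flagk = 1 then
      if pvSqSumA a j k i ≤ maxSum then pvKLoop a maxSum j i rest 1 1
      else pvKLoop a maxSum j i rest 0 0
    else pvKLoop a maxSum j i rest flag flagk

-- the 'for j in range(0, n-i+1)' loop with its break; returns (final j, final flag)
def pvJLoop (a : List (List Int)) (maxSum n i : Int) : List Int → Int → Int → Int × Int
  | [], flag, jv => (jv, flag)
  | j :: rest, flag, _ =>
    if j = 0 ∨ flag = 1 then
      pvJLoop a maxSum n i rest (pvKLoop a maxSum j i (PySem.List.pyRange 0 (n - i + 1) 1) flag 0) j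
    else (j, flag)

-- the 'for i in range(n, 0, -1)' loop with its early return
def pvILoop (a : List (List Int)) (maxSum n : Int) : List Int → Int
  | [] => 0
  | i :: rest =>
    let r := pvJLoop a maxSum n i (PySem.List.pyRange 0 (n - i + 1) 1) 0 0
    if r.1 = n - i ∧ r.2 = 1 then i else pvILoop a maxSum n rest

def matrxi (a : List (List Int)) (maxSum : Int) : Int :=
  pvILoop a maxSum (a.length : Int) (PySem.List.pyRange (a.length : Int) 0 (-1))

-- ===== PORT B =====
-- build one prefix row: cur = [0]; for c in range(n): acc += row[c]; cur.append(prev[c+1] + acc)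
def pvRowStep (n : Int) (prev row : List Int) : List Int :=
  ((PySem.List.pyRange 0 n 1).foldl (fun (st : List Int × Int) c =>
      let acc := st.2 + PySem.List.pyGetD row c 0
      (st.1 ++ [PySem.List.pyGetD prev (c + 1) 0 + acc], acc)) ([0], 0)).1

-- prefix = [[0]*(n+1)]; for row in a: prefix.append(rowStep(prefix[-1], row))
def pvPrefix (a : List (List Int)) (n : Int) : List (List Int) :=
  a.foldl (fun P row => P ++ [pvRowStep n (PySem.List.pyGetD P (-1) []) row])
    [List.replicate (n + 1).toNat 0]

-- O(1) square sum from the table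
def pvSqB (P : List (List Int)) (r c s : Int) : Int :=
  PySem.List.pyGetD (PySem.List.pyGetD P (r + s) []) (c + s) 0
  - PySem.List.pyGetD (PySem.List.pyGetD P r []) (c + s) 0
  - PySem.List.pyGetD (PySem.List.pyGetD P (r + s) []) c 0
  + PySem.List.pyGetD (PySem.List.pyGetD P r []) c 0

-- ok = True; for r …: for c …: if square > maxSum: ok = False
def pvCheck (P : List (List Int)) (maxSum n size : Int) : Bool :=
  (PySem.List.pyRange 0 (n - size + 1) 1).foldl (fun ok r =>
    (PySem.List.pyRange 0 (n - size + 1) 1).foldl (fun ok c =>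
      if pvSqB P r c size > maxSum then false else ok) ok) true

-- for size in range(n, 0, -1): if ok: return size
def pvSizeLoop (P : List (List Int)) (maxSum n : Int) : List Int → Int
  | [] => 0
  | s :: rest => if pvCheck P maxSum n s then s else pvSizeLoop P maxSum n rest

def matrxi_alt (a : List (List Int)) (maxSum : Int) : Int :=
  pvSizeLoop (pvPrefix a (a.length : Int)) maxSum (a.length : Int)
    (PySem.List.pyRange (a.length : Int) 0 (-1))

-- ===== PRECONDITION & SPEC =====
-- Pre_ excludes exactly the ragged matrices (some row shorter than len(a)), on which
-- Python A raises IndexError at a[l][m] (B raises IndexError there too).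
def Pre_matrxi (a : List (List Int)) (maxSum : Int) : Prop :=
  ∀ row ∈ a, a.length ≤ row.length
instance (a : List (List Int)) (maxSum : Int) : Decidable (Pre_matrxi a maxSum) := by
  unfold Pre_matrxi; infer_instance

def pvWitness_matrxi : List (List Int) × Int := ([[1, 2], [3, -4]], 3)

def Spec_matrxi (a : List (List Int)) (maxSum : Int) (out : Int) : Prop := out = matrxi_alt a maxSum
instance (a : List (List Int)) (maxSum : Int) (out : Int) : Decidable (Spec_matrxi a maxSum out) := by
  unfold Spec_matrxi; infer_instance

-- ===== CLAIM (what is proved, stated in full; the proofs are below) =====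
def Claim_equal_matrxi : Prop := ∀ (a : List (List Int)) (maxSum : Int), Dom_matrxi a maxSum → Pre_matrxi a maxSum → Spec_matrxi a maxSum (matrxi a maxSum)

-- ===== LEMMAS AND PROOFS =====

-- the entry a[l][m] read with defaults, and the double prefix sum S r c = Σ_{l<r} Σ_{m<c} a[l][m]
def pvG (a : List (List Int)) (l m : ℕ) : Int := (a.getD l []).getD m 0
def pvS (a : List (List Int)) (r c : ℕ) : Int :=
  ∑ l ∈ Finset.range r, ∑ m ∈ Finset.range c, pvG a l m

theorem pvSumMapRange (f : ℕ → ℤ) (n : ℕ) :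
    ((List.range n).map f).sum = ∑ t ∈ Finset.range n, f t := by
  induction n with
  | zero => simp
  | succ m ih => rw [List.range_succ]; simp [ih, Finset.sum_range_succ]

theorem pvSumRangeAdd (f : ℕ → ℤ) (m n : ℕ) :
    ∑ x ∈ Finset.range (m + n), f x
      = (∑ x ∈ Finset.range m, f x) + ∑ u ∈ Finset.range n, f (m + u) := by
  induction n with
  | zero => simp
  | succ p ih =>
    rw [show m + (p + 1) = (m + p) + 1 by ring, Finset.sum_range_succ, ih,
      Finset.sum_range_succ]
    ring

theorem pvIncl (G : ℕ → ℕ → ℤ) (jn kn iN : ℕ) :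
    ∑ t ∈ Finset.range iN, ∑ u ∈ Finset.range iN, G (jn + t) (kn + u)
      = (∑ l ∈ Finset.range (jn + iN), ∑ m ∈ Finset.range (kn + iN), G l m)
        - (∑ l ∈ Finset.range jn, ∑ m ∈ Finset.range (kn + iN), G l m)
        - (∑ l ∈ Finset.range (jn + iN), ∑ m ∈ Finset.range kn, G l m)
        + (∑ l ∈ Finset.range jn, ∑ m ∈ Finset.range kn, G l m) := by
  calc ∑ t ∈ Finset.range iN, ∑ u ∈ Finset.range iN, G (jn + t) (kn + u)
      = ∑ t ∈ Finset.range iN,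
          ((∑ m ∈ Finset.range (kn + iN), G (jn + t) m) - ∑ m ∈ Finset.range kn, G (jn + t) m) :=
        Finset.sum_congr rfl (fun t _ => by rw [pvSumRangeAdd (G (jn + t)) kn iN]; ring)
    _ = (∑ t ∈ Finset.range iN, ∑ m ∈ Finset.range (kn + iN), G (jn + t) m)
        - ∑ t ∈ Finset.range iN, ∑ m ∈ Finset.range kn, G (jn + t) m := by
          rw [Finset.sum_sub_distrib]
    _ = _ := by
        rw [pvSumRangeAdd (fun l => ∑ m ∈ Finset.range (kn + iN), G l m) jn iN,
          pvSumRangeAdd (fun l => ∑ m ∈ Finset.range kn, G l m) jn iN]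
        ring

theorem pvRowStepAux (prev row : List Int) (t : ℕ) :
    (PySem.List.pyRange 0 (t : Int) 1).foldl
      (fun (st : List Int × Int) c =>
        let acc := st.2 + PySem.List.pyGetD row c 0
        (st.1 ++ [PySem.List.pyGetD prev (c + 1) 0 + acc], acc)) ([0], 0)
    = ((List.range (t + 1)).map (fun c =>
        if c = 0 then 0 else prev.getD c 0 + ∑ m ∈ Finset.range c, row.getD m 0),
       ∑ m ∈ Finset.range t, row.getD m 0) := by
  induction t with
  | zero => simp [PySem.List.pyRange_one]
  | succ p ih =>
    rw [show ((p + 1 : ℕ) : Int) = ((p : ℕ) : Int) + 1 by push_cast; ring,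
      PySem.List.pyRange_one_succ_right (by positivity : (0:Int) ≤ (p : Int)),
      List.foldl_append, ih]
    simp only [List.foldl_cons, List.foldl_nil]
    rw [show ((p : ℕ) : Int) + 1 = ((p + 1 : ℕ) : Int) by push_cast; ring,
      PySem.List.pyGetD_natCast, PySem.List.pyGetD_natCast]
    refine Prod.ext ?_ ?_
    · show _ ++ _ = _
      rw [List.range_succ (n := p + 1), List.map_append]
      simp [Finset.sum_range_succ]
    · show _ = _
      simp [Finset.sum_range_succ]

theorem pvRowStep_eq (prev row : List Int) (t : ℕ) :
    pvRowStep (t : Int) prev row =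
      (List.range (t + 1)).map (fun c =>
        if c = 0 then 0 else prev.getD c 0 + ∑ m ∈ Finset.range c, row.getD m 0) := by
  unfold pvRowStep
  rw [pvRowStepAux]

theorem pvPrefix_eq (a : List (List Int)) (t : ℕ) :
    pvPrefix a (t : Int) =
      (List.range (a.length + 1)).map (fun r =>
        (List.range (t + 1)).map (fun c =>
          ∑ l ∈ Finset.range r, ∑ m ∈ Finset.range c, (a.getD l []).getD m 0)) := by
  induction a using List.reverseRecOn with
  | nil =>
    unfold pvPrefix
    rw [show ((t : Int) + 1).toNat = t + 1 by omega]
    simp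
  | append_singleton as row ih =>
    have h1 : pvPrefix (as ++ [row]) (t : Int) =
        pvPrefix as (t : Int) ++
          [pvRowStep (t : Int) (PySem.List.pyGetD (pvPrefix as (t : Int)) (-1) []) row] := by
      unfold pvPrefix
      rw [List.foldl_append]
      rfl
    rw [h1, ih]
    have hlast : PySem.List.pyGetD ((List.range (as.length + 1)).map (fun r =>
        (List.range (t + 1)).map (fun c =>
          ∑ l ∈ Finset.range r, ∑ m ∈ Finset.range c, (as.getD l []).getD m 0))) (-1) []
        = (List.range (t + 1)).map (fun c =>
            ∑ l ∈ Finset.range as.length, ∑ m ∈ Finset.range c, (as.getD l []).getD m 0) := by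
      rw [List.range_succ (n := as.length), List.map_append]
      exact PySem.List.pyGetD_neg_one_append_singleton _ _ _
    rw [hlast, pvRowStep_eq]
    rw [List.length_append, List.length_cons, List.length_nil, Nat.add_zero]
    rw [List.range_succ (n := as.length + 1), List.map_append]
    congr 1
    · refine List.map_congr_left (fun r hr => ?_)
      have hr' : r < as.length + 1 := List.mem_range.1 hr
      refine List.map_congr_left (fun c _ => ?_)
      refine Finset.sum_congr rfl (fun l hl => ?_)
      have hl' : l < as.length := by have := Finset.mem_range.1 hl; omega
      rw [List.getD_append _ _ _ _ hl']
    · simp only [List.map_cons, List.map_nil]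
      congr 1
      refine List.map_congr_left (fun c hc => ?_)
      have hc' : c < t + 1 := List.mem_range.1 hc
      rw [Finset.sum_range_succ]
      have hrow : (as ++ [row]).getD as.length [] = row := by
        simp
      rw [hrow]
      have hsub : ∀ l ∈ Finset.range as.length,
          ∑ m ∈ Finset.range c, ((as ++ [row]).getD l []).getD m 0
            = ∑ m ∈ Finset.range c, (as.getD l []).getD m 0 := by
        intro l hl
        rw [List.getD_append _ _ _ _ (Finset.mem_range.1 hl)]
      rw [Finset.sum_congr rfl hsub]
      by_cases hc0 : c = 0
      · subst hc0; simp
      · rw [if_neg hc0, PySem.List.getD_map_range _ _ _ _ hc']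

theorem pvSqSumA_eq (a : List (List Int)) (j k i : Int)
    (hj : 0 ≤ j) (hk : 0 ≤ k) (hi : 0 ≤ i) :
    pvSqSumA a j k i =
      pvS a (j + i).toNat (k + i).toNat - pvS a j.toNat (k + i).toNat
      - pvS a (j + i).toNat k.toNat + pvS a j.toNat k.toNat := by
  obtain ⟨jn, rfl⟩ : ∃ jn : ℕ, j = (jn : Int) := ⟨j.toNat, (Int.toNat_of_nonneg hj).symm⟩
  obtain ⟨kn, rfl⟩ : ∃ kn : ℕ, k = (kn : Int) := ⟨k.toNat, (Int.toNat_of_nonneg hk).symm⟩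
  obtain ⟨iN, rfl⟩ : ∃ iN : ℕ, i = (iN : Int) := ⟨i.toNat, (Int.toNat_of_nonneg hi).symm⟩
  unfold pvSqSumA
  rw [PySem.List.foldl_congr_mem _ _
    (fun s l => s + ((PySem.List.pyRange (kn : Int) ((kn : Int) + (iN : Int)) 1).map
      (fun m => PySem.List.pyGetD (PySem.List.pyGetD a l []) m 0)).sum) _
    (fun s l _ => PySem.List.foldl_add _ _ s)]
  rw [PySem.List.foldl_add]
  rw [PySem.List.pyRange_one (jn : Int) ((jn : Int) + (iN : Int)),
    PySem.List.pyRange_one (kn : Int) ((kn : Int) + (iN : Int))]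
  rw [show ((jn : Int) + (iN : Int) - (jn : Int)) = (iN : Int) by ring,
    show ((kn : Int) + (iN : Int) - (kn : Int)) = (iN : Int) by ring]
  simp only [Int.toNat_natCast, List.map_map]
  rw [pvSumMapRange, zero_add]
  simp only [Function.comp_apply]
  have h1 : ∀ t ∈ Finset.range iN,
      (List.map ((fun m => PySem.List.pyGetD (PySem.List.pyGetD a ((jn : Int) + (t : Int)) []) m 0)
          ∘ (fun k : ℕ => (kn : Int) + (k : Int))) (List.range iN)).sum
        = ∑ u ∈ Finset.range iN, pvG a (jn + t) (kn + u) := by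
    intro t _
    rw [pvSumMapRange]
    refine Finset.sum_congr rfl (fun u _ => ?_)
    simp only [Function.comp_apply]
    rw [show (jn : Int) + (t : Int) = ((jn + t : ℕ) : Int) by push_cast; ring,
      show (kn : Int) + (u : Int) = ((kn + u : ℕ) : Int) by push_cast; ring,
      PySem.List.pyGetD_natCast, PySem.List.pyGetD_natCast]
    rfl
  rw [Finset.sum_congr rfl h1, pvIncl (pvG a) jn kn iN]
  have h1 : ((jn : Int) + (iN : Int)).toNat = jn + iN := by omega
  have h2 : ((kn : Int) + (iN : Int)).toNat = kn + iN := by omega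
  simp only [h1, h2, Int.toNat_natCast]
  rfl

theorem pvSqB_eq (a : List (List Int)) (n : ℕ) (r c s : Int)
    (hr : 0 ≤ r) (hc : 0 ≤ c) (hs : 0 ≤ s)
    (hrn : r + s ≤ (n : Int)) (hcn : c + s ≤ (n : Int)) (hn : n = a.length) :
    pvSqB (pvPrefix a (n : Int)) r c s =
      pvS a (r + s).toNat (c + s).toNat - pvS a r.toNat (c + s).toNat
      - pvS a (r + s).toNat c.toNat + pvS a r.toNat c.toNat := by
  subst hn
  obtain ⟨rn, rfl⟩ : ∃ rn : ℕ, r = (rn : Int) := ⟨r.toNat, (Int.toNat_of_nonneg hr).symm⟩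
  obtain ⟨cn, rfl⟩ : ∃ cn : ℕ, c = (cn : Int) := ⟨c.toNat, (Int.toNat_of_nonneg hc).symm⟩
  obtain ⟨sn, rfl⟩ : ∃ sn : ℕ, s = (sn : Int) := ⟨s.toNat, (Int.toNat_of_nonneg hs).symm⟩
  unfold pvSqB
  rw [show ((rn : Int) + (sn : Int)) = ((rn + sn : ℕ) : Int) by push_cast; ring,
    show ((cn : Int) + (sn : Int)) = ((cn + sn : ℕ) : Int) by push_cast; ring]
  rw [pvPrefix_eq a a.length]
  simp only [PySem.List.pyGetD_natCast]
  rw [PySem.List.getD_map_range _ _ _ _ (by omega), PySem.List.getD_map_range _ _ _ _ (by omega),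
    PySem.List.getD_map_range _ _ _ _ (by omega), PySem.List.getD_map_range _ _ _ _ (by omega),
    PySem.List.getD_map_range _ _ _ _ (by omega), PySem.List.getD_map_range _ _ _ _ (by omega)]
  simp only [Int.toNat_natCast]
  rfl

-- A-side loop characterizations
theorem pvKLoop_skip (a : List (List Int)) (maxSum j i : Int) (ks : List Int) (flag : Int)
    (h : ∀ k ∈ ks, k ≠ 0) : pvKLoop a maxSum j i ks flag 0 = flag := by
  induction ks with
  | nil => rfl
  | cons k rest ih =>
    have hk := h k (List.mem_cons_self ..)
    simp only [pvKLoop, if_neg (by simp [hk] : ¬(k = 0 ∨ (0:Int) = 1))]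
    exact ih (fun x hx => h x (List.mem_cons_of_mem _ hx))

theorem pvKLoop_run (a : List (List Int)) (maxSum j i : Int) (ks : List Int)
    (h : ∀ k ∈ ks, k ≠ 0) :
    pvKLoop a maxSum j i ks 1 1 =
      (if ∀ k ∈ ks, pvSqSumA a j k i ≤ maxSum then 1 else 0) := by
  induction ks with
  | nil => simp [pvKLoop]
  | cons k rest ih =>
    simp only [pvKLoop, if_pos (Or.inr rfl)]
    by_cases hok : pvSqSumA a j k i ≤ maxSum
    · rw [if_pos hok, ih (fun x hx => h x (List.mem_cons_of_mem _ hx))]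
      simp [List.forall_mem_cons, hok]
    · rw [if_neg hok, pvKLoop_skip a maxSum j i rest 0 (fun x hx => h x (List.mem_cons_of_mem _ hx))]
      simp [List.forall_mem_cons, hok]

theorem pvKLoop_full (a : List (List Int)) (maxSum j i : Int) (rest : List Int) (flag : Int)
    (h : ∀ k ∈ rest, k ≠ 0) :
    pvKLoop a maxSum j i (0 :: rest) flag 0 =
      (if ∀ k ∈ (0 :: rest : List Int), pvSqSumA a j k i ≤ maxSum then 1 else 0) := by
  simp only [pvKLoop, if_pos (Or.inl rfl)]
  by_cases hok : pvSqSumA a j 0 i ≤ maxSum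
  · rw [if_pos hok, pvKLoop_run a maxSum j i rest h]
    simp [List.forall_mem_cons, hok]
  · rw [if_neg hok, pvKLoop_skip a maxSum j i rest 0 h]
    simp [List.forall_mem_cons, hok]

theorem pvJLoop_break (a : List (List Int)) (maxSum n i : Int) (rest : List Int) (jv : Int)
    (h : ∀ j ∈ rest, j ≠ 0) : (pvJLoop a maxSum n i rest 0 jv).2 = 0 := by
  cases rest with
  | nil => rfl
  | cons j r =>
    have hj := h j (List.mem_cons_self ..)
    simp [pvJLoop, hj]

theorem pvJLoop_all (a : List (List Int)) (maxSum n i : Int) (rest : List Int) (jv : Int)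
    (hok : ∀ j ∈ rest, ∀ k ∈ PySem.List.pyRange 0 (n - i + 1) 1, pvSqSumA a j k i ≤ maxSum)
    (hk : ∀ k ∈ PySem.List.pyRange 1 (n - i + 1) 1, k ≠ (0:Int))
    (hr : PySem.List.pyRange 0 (n - i + 1) 1 = 0 :: PySem.List.pyRange 1 (n - i + 1) 1) :
    pvJLoop a maxSum n i rest 1 jv = (rest.getLast?.getD jv, 1) := by
  induction rest generalizing jv with
  | nil => rfl
  | cons j r ih =>
    simp only [pvJLoop]
    rw [if_pos (Or.inr trivial), hr, pvKLoop_full a maxSum j i _ 1 hk,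
      if_pos (hr ▸ hok j (List.mem_cons_self ..))]
    rw [ih j (fun x hx => hok x (List.mem_cons_of_mem _ hx))]
    cases r with
    | nil => rfl
    | cons x xs =>
      cases hy : (x :: xs).getLast? with
      | none => simp at hy
      | some y => simp [hy]

theorem pvJLoop_notall (a : List (List Int)) (maxSum n i : Int) (rest : List Int) (jv : Int)
    (h : ∀ j ∈ rest, j ≠ 0)
    (hk : ∀ k ∈ PySem.List.pyRange 1 (n - i + 1) 1, k ≠ (0:Int))
    (hr : PySem.List.pyRange 0 (n - i + 1) 1 = 0 :: PySem.List.pyRange 1 (n - i + 1) 1)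
    (hnot : ¬ ∀ j ∈ rest, ∀ k ∈ PySem.List.pyRange 0 (n - i + 1) 1, pvSqSumA a j k i ≤ maxSum) :
    (pvJLoop a maxSum n i rest 1 jv).2 = 0 := by
  induction rest generalizing jv with
  | nil => exact absurd (by simp) hnot
  | cons j r ih =>
    simp only [pvJLoop]
    rw [if_pos (Or.inr trivial), hr, pvKLoop_full a maxSum j i _ 1 hk]
    by_cases hrow : ∀ k ∈ (0 : Int) :: PySem.List.pyRange 1 (n - i + 1) 1, pvSqSumA a j k i ≤ maxSum
    · rw [if_pos hrow]
      exact ih j (fun x hx => h x (List.mem_cons_of_mem _ hx))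
        (by intro hc; exact hnot (by
          intro x hx
          rcases List.mem_cons.1 hx with hx | hx
          · subst hx; rw [hr]; exact hrow
          · exact hc x hx))
    · rw [if_neg hrow]
      exact pvJLoop_break a maxSum n i r j (fun x hx => h x (List.mem_cons_of_mem _ hx))

-- Bool fold helpers for pvCheck
theorem pvFoldlChk {α : Type} (p : α → Prop) [DecidablePred p] (l : List α) (b : Bool) :
    l.foldl (fun ok x => if p x then false else ok) b = (b && l.all (fun x => decide ¬ p x)) := by
  induction l generalizing b with
  | nil => simp
  | cons x xs ih =>
    by_cases h : p x
    · rw [List.foldl_cons, if_pos h, ih]; simp [h]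
    · rw [List.foldl_cons, if_neg h, ih]; simp [h, Bool.and_assoc]

theorem pvFoldlAndBool {α : Type} (f : α → Bool) (l : List α) (b : Bool) :
    l.foldl (fun ok x => ok && f x) b = (b && l.all f) := by
  induction l generalizing b with
  | nil => simp
  | cons x xs ih => simp [ih, Bool.and_assoc]

-- B-side check characterization
theorem pvCheck_eq (P : List (List Int)) (maxSum n size : Int) :
    pvCheck P maxSum n size = true ↔
      (∀ r ∈ PySem.List.pyRange 0 (n - size + 1) 1,
        ∀ c ∈ PySem.List.pyRange 0 (n - size + 1) 1, pvSqB P r c size ≤ maxSum) := by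
  unfold pvCheck
  rw [PySem.List.foldl_congr_mem _ _
    (fun ok r => ok && (PySem.List.pyRange 0 (n - size + 1) 1).all
      (fun c => decide ¬ (pvSqB P r c size > maxSum))) _
    (fun ok r _ => pvFoldlChk (fun c => pvSqB P r c size > maxSum) _ ok)]
  rw [pvFoldlAndBool]
  simp [not_lt]

theorem pvRangeLast (m : Int) (h0 : 0 ≤ m) :
    ((PySem.List.pyRange 1 (m + 1) 1).getLast?.getD 0 : Int) = m := by
  rcases eq_or_lt_of_le h0 with h | h
  · rw [← h]; simp [PySem.List.pyRange_one]
  · rw [PySem.List.pyRange_one_succ_right (by omega : (1:Int) ≤ m)]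
    simp

-- the two square sums agree (both equal the prefix-sum inclusion–exclusion value)
theorem pvBridge (a : List (List Int)) (i : Int) (h1 : 1 ≤ i) (h2 : i ≤ (a.length : Int)) :
    ∀ r ∈ PySem.List.pyRange 0 ((a.length : Int) - i + 1) 1,
      ∀ c ∈ PySem.List.pyRange 0 ((a.length : Int) - i + 1) 1,
        pvSqSumA a r c i = pvSqB (pvPrefix a (a.length : Int)) r c i := by
  intro r hrm c hcm
  have hrb := PySem.List.mem_pyRange_one.1 hrm
  have hcb := PySem.List.mem_pyRange_one.1 hcm
  rw [pvSqSumA_eq a r c i (by omega) (by omega) (by omega),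
    pvSqB_eq a a.length r c i (by omega) (by omega) (by omega) (by omega) (by omega) rfl]

-- the full j-loop: success and failure cases
theorem pvJLoopTop_pos (a : List (List Int)) (maxSum n i : Int) (h1 : 1 ≤ i) (h2 : i ≤ n)
    (hall : ∀ j ∈ PySem.List.pyRange 0 (n - i + 1) 1,
      ∀ k ∈ PySem.List.pyRange 0 (n - i + 1) 1, pvSqSumA a j k i ≤ maxSum) :
    pvJLoop a maxSum n i (PySem.List.pyRange 0 (n - i + 1) 1) 0 0 = (n - i, 1) := by
  have hlt : (0:Int) < n - i + 1 := by omega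
  have hr := PySem.List.pyRange_one_cons hlt
  norm_num at hr
  have hk : ∀ k ∈ PySem.List.pyRange 1 (n - i + 1) 1, k ≠ (0:Int) := by
    intro k hkk; have := PySem.List.mem_pyRange_one.1 hkk; omega
  have hall' := hr ▸ hall
  rw [hr]
  simp only [pvJLoop]
  rw [if_pos (Or.inl trivial), hr, pvKLoop_full a maxSum 0 i _ 0 hk,
    if_pos (hall' 0 (List.mem_cons_self ..))]
  rw [pvJLoop_all a maxSum n i _ 0
    (fun j hj => hall j (by rw [hr]; exact List.mem_cons_of_mem _ hj)) hk hr]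
  rw [pvRangeLast (n - i) (by omega)]

theorem pvJLoopTop_neg (a : List (List Int)) (maxSum n i : Int) (h1 : 1 ≤ i) (h2 : i ≤ n)
    (hnot : ¬ ∀ j ∈ PySem.List.pyRange 0 (n - i + 1) 1,
      ∀ k ∈ PySem.List.pyRange 0 (n - i + 1) 1, pvSqSumA a j k i ≤ maxSum) :
    (pvJLoop a maxSum n i (PySem.List.pyRange 0 (n - i + 1) 1) 0 0).2 = 0 := by
  have hlt : (0:Int) < n - i + 1 := by omega
  have hr := PySem.List.pyRange_one_cons hlt
  norm_num at hr
  have hk : ∀ k ∈ PySem.List.pyRange 1 (n - i + 1) 1, k ≠ (0:Int) := by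
    intro k hkk; have := PySem.List.mem_pyRange_one.1 hkk; omega
  rw [hr]
  simp only [pvJLoop]
  rw [if_pos (Or.inl trivial), hr, pvKLoop_full a maxSum 0 i _ 0 hk]
  by_cases hrow : ∀ k ∈ (0 : Int) :: PySem.List.pyRange 1 (n - i + 1) 1, pvSqSumA a 0 k i ≤ maxSum
  · rw [if_pos hrow]
    refine pvJLoop_notall a maxSum n i _ 0 hk hk hr ?_
    intro hc
    exact hnot (by
      intro x hx
      rw [hr] at hx
      rcases List.mem_cons.1 hx with hx | hx
      · subst hx; rw [hr]; exact hrow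
      · exact hc x hx)
  · rw [if_neg hrow]
    exact pvJLoop_break a maxSum n i _ 0 hk

-- per-size equivalence of the two tests
theorem pvStep_eq (a : List (List Int)) (maxSum : Int) (i : Int)
    (h1 : 1 ≤ i) (h2 : i ≤ (a.length : Int)) :
    ((pvJLoop a maxSum (a.length : Int) i
        (PySem.List.pyRange 0 ((a.length : Int) - i + 1) 1) 0 0).1 = (a.length : Int) - i ∧
     (pvJLoop a maxSum (a.length : Int) i
        (PySem.List.pyRange 0 ((a.length : Int) - i + 1) 1) 0 0).2 = 1) ↔
    pvCheck (pvPrefix a (a.length : Int)) maxSum (a.length : Int) i = true := by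
  rw [pvCheck_eq]
  by_cases hall : ∀ j ∈ PySem.List.pyRange 0 ((a.length : Int) - i + 1) 1,
      ∀ k ∈ PySem.List.pyRange 0 ((a.length : Int) - i + 1) 1, pvSqSumA a j k i ≤ maxSum
  · rw [pvJLoopTop_pos a maxSum _ i h1 h2 hall]
    exact iff_of_true ⟨rfl, rfl⟩
      (fun r hrm c hcm => by rw [← pvBridge a i h1 h2 r hrm c hcm]; exact hall r hrm c hcm)
  · have h2' := pvJLoopTop_neg a maxSum _ i h1 h2 hall
    refine iff_of_false (fun hx => ?_) (fun hc => hall ?_)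
    · rw [h2'] at hx
      exact absurd hx.2 (by norm_num)
    · intro r hrm c hcm
      rw [pvBridge a i h1 h2 r hrm c hcm]
      exact hc r hrm c hcm

theorem pvLoop_eq (a : List (List Int)) (maxSum : Int) (is : List Int)
    (h : ∀ i ∈ is, 1 ≤ i ∧ i ≤ (a.length : Int)) :
    pvILoop a maxSum (a.length : Int) is =
      pvSizeLoop (pvPrefix a (a.length : Int)) maxSum (a.length : Int) is := by
  induction is with
  | nil => rfl
  | cons i rest ih =>
    simp only [pvILoop, pvSizeLoop]
    have hi := h i (List.mem_cons_self ..)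
    have hstep := pvStep_eq a maxSum i hi.1 hi.2
    by_cases hc : pvCheck (pvPrefix a (a.length : Int)) maxSum (a.length : Int) i = true
    · rw [if_pos (hstep.2 hc), if_pos hc]
    · rw [if_neg (fun hx => hc (hstep.1 hx)), if_neg hc,
        ih (fun x hx => h x (List.mem_cons_of_mem _ hx))]

-- ===== VERDICT (by name: the statement is the Claim_ definition above) =====
theorem matrxi_spec : Claim_equal_matrxi := by
  intro a maxSum _ _
  unfold Spec_matrxi matrxi matrxi_alt
  exact pvLoop_eq a maxSum _ (by
    intro i hi
    have := (PySem.List.mem_pyRange_neg_one).1 hi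
    omega)
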